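-- pv_equiv track=rewrite | github.com/mesumbinshaukat/private-coding-assistant | api/agent_core.py | parse
-- ===== SOURCE A (Python) =====
-- from typing import Dict, List, Any, Optional, Tuple
--
-- def parse(text: str) -> Dict[str, Any]:
--     """Parse ReAct format: Thought: ... Action: ... Observation: ..."""
--     sections = {}
--     current_section = None
--     current_content = []
--
--     for line in text.split('\n'):
--         if line.startswith('Thought:'):
--             if current_section:
--                 sections[current_section] = '\n'.join(current_content)
--             current_section = 'thought'
--             current_content = [line[8:].strip()]
--         elif line.startswith('Action:'):
--             if current_section:
--                 sections[current_section] = '\n'.join(current_content)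
--             current_section = 'action'
--             current_content = [line[7:].strip()]
--         elif line.startswith('Observation:'):
--             if current_section:
--                 sections[current_section] = '\n'.join(current_content)
--             current_section = 'observation'
--             current_content = [line[12:].strip()]
--         else:
--             if current_content:
--                 current_content.append(line)
--
--     if current_section:
--         sections[current_section] = '\n'.join(current_content)
--
--     return sections
-- ===== SOURCE B (Python) =====
-- HEADERS = (('Thought:', 'thought'), ('Action:', 'action'), ('Observation:', 'observation'))
--
-- def parse(text):
--     """Parse ReAct sections by a single reverse sweep: walking the lines back to
--     front, accumulate trailing content until a header line is met, emit the
--     finished section, and finally build the dict from the forward pair list."""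
--     pairs = []
--     tail = []
--     for line in reversed(text.split('\n')):
--         hit = None
--         for prefix, name in HEADERS:
--             if line.startswith(prefix):
--                 hit = (name, line[len(prefix):].strip())
--                 break
--         if hit is not None:
--             pairs = [(hit[0], '\n'.join([hit[1]] + tail))] + pairs
--             tail = []
--         else:
--             tail = [line] + tail
--     return dict(pairs)
-- ===== Notes on version B (the rewrite author's own statement) =====
-- stated objective: alternative
-- what changed: Replaces the forward streaming state machine (current section + pending content buffer, flushed at each header and at EOF) with a single reverse sweep over the lines that accumulates trailing content and emits each completed section the moment its header line is reached, building the dict from the resulting pair list at the end.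
import Mathlib
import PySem

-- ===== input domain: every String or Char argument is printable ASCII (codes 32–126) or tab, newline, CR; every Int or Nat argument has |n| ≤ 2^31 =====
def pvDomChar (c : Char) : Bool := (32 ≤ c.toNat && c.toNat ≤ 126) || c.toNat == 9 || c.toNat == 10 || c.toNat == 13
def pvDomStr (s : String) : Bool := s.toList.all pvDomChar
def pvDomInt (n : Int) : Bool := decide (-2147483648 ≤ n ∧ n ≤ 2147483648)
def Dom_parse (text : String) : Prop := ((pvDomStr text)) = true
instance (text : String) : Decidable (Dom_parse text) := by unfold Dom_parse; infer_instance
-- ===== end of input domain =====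

-- B replaces A's forward streaming state machine by a single reverse sweep that
-- accumulates trailing content and emits each section at its header line (objective: alternative).

-- ===== PORT A =====
-- one iteration of A's loop: state = (sections, current_section, current_content)
def parseStep (st : PySem.Dict String String × Option String × List String) (line : String) :
    PySem.Dict String String × Option String × List String :=
  if PySem.Str.startswith line "Thought:" then
    ((match st.2.1 with
      | some n => st.1.insert n (PySem.Str.join "\n" st.2.2)
      | none => st.1),
     some "thought", [PySem.Str.strip (PySem.Str.slice line (some 8) none)])
  else if PySem.Str.startswith line "Action:" then
    ((match st.2.1 with
      | some n => st.1.insert n (PySem.Str.join "\n" st.2.2)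
      | none => st.1),
     some "action", [PySem.Str.strip (PySem.Str.slice line (some 7) none)])
  else if PySem.Str.startswith line "Observation:" then
    ((match st.2.1 with
      | some n => st.1.insert n (PySem.Str.join "\n" st.2.2)
      | none => st.1),
     some "observation", [PySem.Str.strip (PySem.Str.slice line (some 12) none)])
  else if st.2.2.isEmpty then st
  else (st.1, st.2.1, st.2.2 ++ [line])

def parse (text : String) : List (String × String) :=
  -- text.split('\n'): the separator "\n" is nonempty, so split? is always `some`; getD [] unwraps
  let lines := (PySem.Str.split? text "\n").getD []
  let st := lines.foldl parseStep (PySem.Dict.empty, none, [])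
  match st.2.1 with
  | some n => (st.1.insert n (PySem.Str.join "\n" st.2.2)).items
  | none => st.1.items

-- ===== PORT B =====
def pvHeaders : List (String × String) :=
  [("Thought:", "thought"), ("Action:", "action"), ("Observation:", "observation")]

-- B's inner for-with-break over HEADERS
def altHit (line : String) : Option (String × String) :=
  (pvHeaders.find? (fun p => PySem.Str.startswith line p.1)).map
    (fun p => (p.2, PySem.Str.strip (PySem.Str.slice line (some (PySem.Str.len p.1)) none)))

-- one iteration of B's reverse loop: state = (pairs, tail)
def altStep (st : List (String × String) × List String) (line : String) :
    List (String × String) × List String :=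
  match altHit line with
  | some hit => ((hit.1, PySem.Str.join "\n" (hit.2 :: st.2)) :: st.1, [])
  | none => (st.1, line :: st.2)

def parse_alt (text : String) : List (String × String) :=
  let lines := (PySem.Str.split? text "\n").getD []
  let st := lines.reverse.foldl altStep ([], [])
  (PySem.Dict.ofList st.1).items

-- ===== PRECONDITION & SPEC =====
def Spec_parse (text : String) (out : List (String × String)) : Prop := out = parse_alt text
instance (text : String) (out : List (String × String)) : Decidable (Spec_parse text out) := by unfold Spec_parse; infer_instance

-- ===== CLAIM (what is proved, stated in full; the proofs are below) =====
def Claim_equal_parse : Prop := ∀ (text : String), Dom_parse text → Spec_parse text (parse text)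

-- ===== LEMMAS AND PROOFS =====

-- classification of a line, exactly A's if/elif chain
def headerOf (line : String) : Option (String × String) :=
  if PySem.Str.startswith line "Thought:" then
    some ("thought", PySem.Str.strip (PySem.Str.slice line (some 8) none))
  else if PySem.Str.startswith line "Action:" then
    some ("action", PySem.Str.strip (PySem.Str.slice line (some 7) none))
  else if PySem.Str.startswith line "Observation:" then
    some ("observation", PySem.Str.strip (PySem.Str.slice line (some 12) none))
  else none

def nh (line : String) : Bool := (headerOf line).isNone

-- the canonical (name, content) pair list of a line list
def segPairs : List String → List (String × String)
  | [] => []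
  | l :: ls =>
    match headerOf l with
    | some p => (p.1, PySem.Str.join "\n" (p.2 :: ls.takeWhile nh)) :: segPairs (ls.dropWhile nh)
    | none => segPairs ls
termination_by ls => ls.length
decreasing_by
  · have := List.length_dropWhile_le nh ls; simp; omega
  · simp

def ins (d : PySem.Dict String String) (p : String × String) : PySem.Dict String String :=
  d.insert p.1 p.2

def finA (st : PySem.Dict String String × Option String × List String) : PySem.Dict String String :=
  match st.2.1 with
  | some n => st.1.insert n (PySem.Str.join "\n" st.2.2)
  | none => st.1

def emits (cur : Option String) (c : List String) (ls : List String) : List (String × String) :=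
  match cur with
  | none => segPairs ls
  | some n => (n, PySem.Str.join "\n" (c ++ ls.takeWhile nh)) :: segPairs (ls.dropWhile nh)

theorem altHit_eq (line : String) : altHit line = headerOf line := by
  unfold altHit pvHeaders headerOf
  cases h1 : PySem.Str.startswith line "Thought:" <;>
    cases h2 : PySem.Str.startswith line "Action:" <;>
      cases h3 : PySem.Str.startswith line "Observation:" <;>
        simp_all [List.find?,
          (by decide : "Thought:".length = 8),
          (by decide : "Action:".length = 7),
          (by decide : "Observation:".length = 12)]

theorem parseStep_header {l : String} {p : String × String} (h : headerOf l = some p)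
    (d : PySem.Dict String String) (cur : Option String) (c : List String) :
    parseStep (d, cur, c) l =
      ((match cur with
        | some m => d.insert m (PySem.Str.join "\n" c)
        | none => d), some p.1, [p.2]) := by
  obtain ⟨pn, ps⟩ := p
  unfold headerOf at h
  unfold parseStep
  split_ifs at h ⊢ <;> simp_all

theorem parseStep_nonheader {l : String} (h : headerOf l = none)
    (d : PySem.Dict String String) (cur : Option String) (c : List String) :
    parseStep (d, cur, c) l = (d, cur, if c.isEmpty then c else c ++ [l]) := by
  unfold headerOf at h
  unfold parseStep
  split_ifs at h ⊢ <;> simp_all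

theorem segPairs_dropWhile (ls : List String) : segPairs (ls.dropWhile nh) = segPairs ls := by
  induction ls with
  | nil => rfl
  | cons l ls ih =>
    by_cases h : nh l = true
    · have hh : headerOf l = none := by
        unfold nh at h; exact Option.isNone_iff_eq_none.mp h
      rw [List.dropWhile_cons_of_pos h, ih, segPairs, hh]
    · rw [List.dropWhile_cons_of_neg h]

theorem foldA (ls : List String) (d : PySem.Dict String String) (cur : Option String)
    (c : List String) (h : cur = none ↔ c = []) :
    finA (ls.foldl parseStep (d, cur, c)) = (emits cur c ls).foldl ins d := by
  induction ls generalizing d cur c with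
  | nil =>
    cases cur with
    | none => simp [finA, emits, segPairs]
    | some n => simp [finA, emits, segPairs, List.takeWhile, List.dropWhile, ins]
  | cons l ls ih =>
    cases hh : headerOf l with
    | none =>
      have hnh : nh l = true := by unfold nh; simp [hh]
      rw [List.foldl_cons, parseStep_nonheader hh]
      cases cur with
      | none =>
        have hc : c = [] := h.mp rfl
        subst hc
        rw [if_pos (show ([] : List String).isEmpty = true from rfl)]
        rw [ih d none [] (by simp)]
        simp [emits, segPairs, hh]
      | some n =>
        have hc : c ≠ [] := fun hc => by simpa using h.mpr hc
        rw [if_neg (by simpa using hc)]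
        rw [ih d (some n) (c ++ [l]) (by simp)]
        simp [emits, List.takeWhile_cons_of_pos hnh, List.dropWhile_cons_of_pos hnh]
    | some p =>
      have hnh : nh l = false := by unfold nh; simp [hh]
      rw [List.foldl_cons, parseStep_header hh]
      cases cur with
      | none =>
        rw [ih _ (some p.1) [p.2] (by simp)]
        simp [emits, segPairs, hh]
      | some n =>
        rw [ih _ (some p.1) [p.2] (by simp)]
        simp [emits, hnh, segPairs, hh, ins, List.foldl_cons]

theorem foldB (ls : List String) :
    ls.reverse.foldl altStep ([], []) = (segPairs ls, ls.takeWhile nh) := by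
  rw [List.foldl_reverse]
  induction ls with
  | nil => simp [segPairs]
  | cons l ls ih =>
    rw [List.foldr_cons, ih]
    cases hh : headerOf l with
    | none =>
      have hnh : nh l = true := by unfold nh; simp [hh]
      simp [altStep, altHit_eq, hh, segPairs, hnh]
    | some p =>
      have hnh : nh l = false := by unfold nh; simp [hh]
      simp [altStep, altHit_eq, hh, segPairs, segPairs_dropWhile, hnh]

-- ===== VERDICT (by name: the statement is the Claim_ definition above) =====
theorem parse_spec : Claim_equal_parse := by
  intro text _
  show parse text = parse_alt text
  simp only [parse, parse_alt]
  generalize (PySem.Str.split? text "\n").getD [] = lines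
  rw [foldB lines]
  have hA := foldA lines PySem.Dict.empty none [] (by simp)
  cases hcur : (List.foldl parseStep (PySem.Dict.empty, none, []) lines).2.1 with
  | none =>
    simp only [finA, hcur] at hA
    dsimp only
    rw [hA]; rfl
  | some n =>
    simp only [finA, hcur] at hA
    dsimp only
    rw [hA]; rfl
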